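-- pv_equiv track=rewrite | github.com/azraeltruthsay/gaia | gaia-common/gaia_common/utils/convo_normalizer.py | _messages_to_transcript
-- ===== SOURCE A (Python) =====
-- from typing import List, Optional, Tuple
--
-- def _messages_to_transcript(messages: List[Tuple[str, str]]) -> str:
--     """Convert [(role, text), ...] to transcript format with > markers."""
--     lines = []
--     i = 0
--     while i < len(messages):
--         role, text = messages[i]
--         if role == "user":
--             lines.append(f"> {text}")
--             if i + 1 < len(messages) and messages[i + 1][0] == "assistant":
--                 lines.append(messages[i + 1][1])
--                 i += 2
--             else:
--                 i += 1
--         else: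
--             lines.append(text)
--             i += 1
--         lines.append("")
--     return "\n".join(lines)
-- ===== SOURCE B (Python) =====
-- from typing import List, Tuple
--
-- def _messages_to_transcript(messages: List[Tuple[str, str]]) -> str:
--     """Convert [(role, text), ...] to transcript format with > markers."""
--     groups = []
--     pending = None  # user text awaiting a possible assistant reply
--     for role, text in messages:
--         if pending is not None:
--             if role == "assistant":
--                 groups.append(f"> {pending}\n{text}")
--                 pending = None
--                 continue
--             groups.append(f"> {pending}")
--             pending = None
--         if role == "user":
--             pending = text
--         else:
--             groups.append(text)
--     if pending is not None:
--         groups.append(f"> {pending}")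
--     return "\n\n".join(groups) + "\n" if groups else ""
-- ===== Notes on version B (the rewrite author's own statement) =====
-- stated objective: simpler
-- what changed: Replaces the manual-index while loop that interleaves blank-line appends with a single grouping fold (carrying a pending user message awaiting its assistant reply) followed by a separate '\n\n'-join formatting phase.
import Mathlib
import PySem

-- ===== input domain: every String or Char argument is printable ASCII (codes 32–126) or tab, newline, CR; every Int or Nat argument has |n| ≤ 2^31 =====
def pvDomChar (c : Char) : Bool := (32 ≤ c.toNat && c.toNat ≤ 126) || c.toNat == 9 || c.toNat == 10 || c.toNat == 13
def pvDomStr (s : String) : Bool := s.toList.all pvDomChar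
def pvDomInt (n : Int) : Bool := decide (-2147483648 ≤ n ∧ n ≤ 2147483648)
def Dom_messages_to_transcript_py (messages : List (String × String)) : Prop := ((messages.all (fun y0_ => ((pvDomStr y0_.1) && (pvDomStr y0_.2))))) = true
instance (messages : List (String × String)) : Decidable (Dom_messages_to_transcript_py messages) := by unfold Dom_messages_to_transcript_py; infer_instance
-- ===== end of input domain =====

-- B replaces A's interleaved blank-line appends and manual index stepping by a single
-- grouping pass (fold carrying a pending user message) followed by a separate
-- "\n\n"-join formatting phase; objective: simpler decomposition, same cost.


-- ===== PORT A =====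
-- A's while loop over index i, transcribed as recursion on the remaining suffix:
-- each step appends the lines of one message (consuming the immediately following
-- assistant message after a user message) followed by "".
def pvAgo : List (String × String) → List String
  | [] => []
  | (role, text) :: rest =>
    if role == "user" then
      match rest with
      | (r2, t2) :: rest2 =>
        if r2 == "assistant" then
          ("> " ++ text) :: t2 :: "" :: pvAgo rest2
        else
          ("> " ++ text) :: "" :: pvAgo ((r2, t2) :: rest2)
      | [] => ("> " ++ text) :: "" :: pvAgo []
    else
      text :: "" :: pvAgo rest

def messages_to_transcript_py (messages : List (String × String)) : String :=
  PySem.Str.join "\n" (pvAgo messages)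

-- ===== PORT B =====
-- one step of B's grouping fold: state = (groups so far, pending user text)
def pvStep (st : List String × Option String) (m : String × String) :
    List String × Option String :=
  match st, m with
  | (groups, pending), (role, text) =>
    match pending with
    | some p =>
      if role == "assistant" then (groups ++ ["> " ++ p ++ "\n" ++ text], none)
      else
        let groups := groups ++ ["> " ++ p]
        if role == "user" then (groups, some text) else (groups ++ [text], none)
    | none =>
      if role == "user" then (groups, some text) else (groups ++ [text], none)

-- B's trailing 'if pending is not None: groups.append(...)'
def pvFlush (st : List String × Option String) : List String :=
  match st.2 with
  | some p => st.1 ++ ["> " ++ p]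
  | none => st.1

def messages_to_transcript_py_alt (messages : List (String × String)) : String :=
  let groups := pvFlush (messages.foldl pvStep ([], none))
  if groups = [] then "" else PySem.Str.join "\n\n" groups ++ "\n"

-- ===== PRECONDITION & SPEC =====
def Spec_messages_to_transcript_py (messages : List (String × String)) (out : String) : Prop := out = messages_to_transcript_py_alt messages
instance (messages : List (String × String)) (out : String) : Decidable (Spec_messages_to_transcript_py messages out) := by unfold Spec_messages_to_transcript_py; infer_instance

-- ===== CLAIM (what is proved, stated in full; the proofs are below) =====
def Claim_equal_messages_to_transcript_py : Prop := ∀ (messages : List (String × String)), Dom_messages_to_transcript_py messages → Spec_messages_to_transcript_py messages (messages_to_transcript_py messages)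

-- ===== LEMMAS AND PROOFS =====

-- the groups B's fold produces, characterised recursively (pending state first)
def pvG : Option String → List (String × String) → List String
  | none, [] => []
  | some p, [] => ["> " ++ p]
  | none, (r, t) :: rest => if r == "user" then pvG (some t) rest else t :: pvG none rest
  | some p, (r, t) :: rest =>
    if r == "assistant" then ("> " ++ p ++ "\n" ++ t) :: pvG none rest
    else ("> " ++ p) :: pvG none ((r, t) :: rest)
termination_by pending ms => (ms.length, if pending.isSome then 1 else 0)

lemma pvFoldl_eq_pvG (ms : List (String × String)) :
    ∀ (groups : List String) (pending : Option String),
      pvFlush (ms.foldl pvStep (groups, pending)) = groups ++ pvG pending ms := by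
  induction ms with
  | nil =>
    intro groups pending
    cases pending <;> simp [pvFlush, pvG]
  | cons m rest ih =>
    intro groups pending
    obtain ⟨r, t⟩ := m
    cases pending with
    | none =>
      by_cases hu : r == "user"
      · rw [pvG.eq_def]; simp only [List.foldl_cons, pvStep, hu, if_true, ih]
      · rw [pvG.eq_def]; simp [pvStep, hu, ih]
    | some p =>
      by_cases ha : r == "assistant"
      · rw [pvG.eq_def]; simp [pvStep, ha, ih]
      · by_cases hu : r == "user"
        · have hr : pvG none ((r, t) :: rest) = pvG (some t) rest := by
            conv_lhs => rw [pvG.eq_def]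
            simp [hu]
          rw [pvG.eq_def]; simp [pvStep, ha, hu, ih, hr]
        · have hr : pvG none ((r, t) :: rest) = t :: pvG none rest := by
            conv_lhs => rw [pvG.eq_def]
            simp [hu]
          rw [pvG.eq_def]; simp [pvStep, ha, hu, ih, hr]

-- the formatting phase of B, at the List Char level
def pvFmt (gs : List String) : List Char :=
  if gs = [] then [] else PySem.Chars.join ['\n', '\n'] (gs.map String.toList) ++ ['\n']

lemma pvG_none_ne_nil (m : String × String) (rest : List (String × String)) :
    pvG none (m :: rest) ≠ [] := by
  obtain ⟨r, t⟩ := m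
  rw [pvG.eq_def]
  by_cases hu : r == "user"
  · simp only [hu, if_true]
    cases rest with
    | nil => simp [pvG]
    | cons m2 rest2 =>
      obtain ⟨r2, t2⟩ := m2
      rw [pvG.eq_def]
      by_cases ha : r2 == "assistant" <;> simp [ha]
  · simp [hu]

lemma pvAgo_ne_nil (m : String × String) (rest : List (String × String)) :
    pvAgo (m :: rest) ≠ [] := by
  obtain ⟨r, t⟩ := m
  rw [pvAgo.eq_def]
  by_cases hu : r == "user"
  · simp only [hu, if_true]
    cases rest with
    | nil => simp
    | cons m2 rest2 =>
      obtain ⟨r2, t2⟩ := m2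
      by_cases ha : r2 == "assistant" <;> simp [ha]
  · simp [hu]

-- join over a nonempty tail unfolds once
lemma pvJoin_cons (sep a : List Char) (gs : List (List Char)) (h : gs ≠ []) :
    PySem.Chars.join sep (a :: gs) = a ++ sep ++ PySem.Chars.join sep gs := by
  cases gs with
  | nil => exact absurd rfl h
  | cons b r => exact PySem.Chars.join_cons_cons sep a b r

lemma pvKey : ∀ ms : List (String × String),
    PySem.Chars.join ['\n'] ((pvAgo ms).map String.toList) = pvFmt (pvG none ms) := by
  intro ms
  induction ms using pvAgo.induct with
  | case1 => simp [pvAgo, pvG, pvFmt, PySem.Chars.join_nil]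
  | case2 role text hu r2 t2 rest2 ha ih =>
    -- user followed by assistant
    have hg : pvG none ((role, text) :: (r2, t2) :: rest2)
        = ("> " ++ text ++ "\n" ++ t2) :: pvG none rest2 := by
      rw [pvG.eq_def]; simp only [hu, if_true]; rw [pvG.eq_def]; simp [ha]
    have hA : pvAgo ((role, text) :: (r2, t2) :: rest2)
        = ("> " ++ text) :: t2 :: "" :: pvAgo rest2 := by
      rw [pvAgo.eq_def]; simp [hu, ha]
    rw [hg, hA]
    cases rest2 with
    | nil =>
      simp [pvAgo, pvG, pvFmt, PySem.Chars.join_cons_cons,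
        PySem.Chars.join_singleton, String.toList_append]
    | cons m3 rest3 =>
      have h1 := pvAgo_ne_nil m3 rest3
      have h2 := pvG_none_ne_nil m3 rest3
      rw [List.map_cons, List.map_cons, List.map_cons,
        PySem.Chars.join_cons_cons, PySem.Chars.join_cons_cons,
        pvJoin_cons _ _ _ (by simpa using h1), ih,
        pvFmt, pvFmt, if_neg (by simp [h2]), if_neg (by simp)]
      rw [List.map_cons, pvJoin_cons _ _ _ (by simpa using h2)]
      simp [String.toList_append]
  | case3 role text hu r2 t2 rest2 ha ih =>
    -- user not followed by assistant
    have h1 := pvAgo_ne_nil (r2, t2) rest2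
    have h2 := pvG_none_ne_nil (r2, t2) rest2
    have hg : pvG none ((role, text) :: (r2, t2) :: rest2)
        = ("> " ++ text) :: pvG none ((r2, t2) :: rest2) := by
      rw [pvG.eq_def]; simp only [hu, if_true]; rw [pvG.eq_def]; simp [ha]
    have hA : pvAgo ((role, text) :: (r2, t2) :: rest2)
        = ("> " ++ text) :: "" :: pvAgo ((r2, t2) :: rest2) := by
      rw [pvAgo.eq_def]; simp [hu, ha]
    rw [hg, hA]
    rw [List.map_cons, List.map_cons, PySem.Chars.join_cons_cons,
      pvJoin_cons _ _ _ (by simpa using h1), ih,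
      pvFmt, pvFmt, if_neg (by simp [h2]), if_neg (by simp)]
    rw [List.map_cons, pvJoin_cons _ _ _ (by simpa using h2)]
    simp [String.toList_append]
  | case4 role text hu ih =>
    -- lone trailing user message
    have hg : pvG none [(role, text)] = ["> " ++ text] := by
      rw [pvG.eq_def]; simp [hu, pvG]
    have hA : pvAgo [(role, text)] = ["> " ++ text, ""] := by
      rw [pvAgo.eq_def]; simp [hu, pvAgo]
    rw [hg, hA]
    simp [pvFmt, PySem.Chars.join_cons_cons, PySem.Chars.join_singleton]
  | case5 role text rest hu ih =>
    -- non-user message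
    have hg : pvG none ((role, text) :: rest) = text :: pvG none rest := by
      rw [pvG.eq_def]; simp [hu]
    have hA : pvAgo ((role, text) :: rest) = text :: "" :: pvAgo rest := by
      rw [pvAgo.eq_def]; simp [hu]
    rw [hg, hA]
    cases rest with
    | nil =>
      simp [pvAgo, pvG, pvFmt, PySem.Chars.join_cons_cons, PySem.Chars.join_singleton]
    | cons m2 rest2 =>
      have h1 := pvAgo_ne_nil m2 rest2
      have h2 := pvG_none_ne_nil m2 rest2
      rw [List.map_cons, List.map_cons, PySem.Chars.join_cons_cons,
        pvJoin_cons _ _ _ (by simpa using h1), ih,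
        pvFmt, pvFmt, if_neg (by simp [h2]), if_neg (by simp)]
      rw [List.map_cons, pvJoin_cons _ _ _ (by simpa using h2)]
      simp

lemma pvAlt_toList (ms : List (String × String)) :
    (messages_to_transcript_py_alt ms).toList = pvFmt (pvG none ms) := by
  unfold messages_to_transcript_py_alt
  rw [pvFoldl_eq_pvG ms [] none, List.nil_append]
  by_cases hnil : pvG none ms = []
  · simp [hnil, pvFmt]
  · simp [hnil, pvFmt, String.toList_append, PySem.Str.toList_join]

-- ===== VERDICT (by name: the statement is the Claim_ definition above) =====
theorem messages_to_transcript_py_spec : Claim_equal_messages_to_transcript_py := by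
  intro ms _
  unfold Spec_messages_to_transcript_py
  apply String.toList_inj.mp
  rw [pvAlt_toList ms, ← pvKey ms]
  simp [messages_to_transcript_py, PySem.Str.toList_join]
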